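-- pv_equiv track=rewrite | github.com/turbodumba/UZH-Informatik-1 | Midterm_Informatik1/Task 4.py | bill
-- ===== SOURCE A (Python) =====
-- def bill(per_hour, parts_prices_hours):
--     total_cost = 0
--     one_none = False
--     for key in parts_prices_hours:
--         tup = parts_prices_hours.get(key)
--         part_price = tup[0]
--         part_hours = tup[1]
--         if part_price is None:
--             part_price = 0
--             one_none = True
--         if part_hours is None:
--             part_hours = 1
--             one_none = True
--         total_cost += part_price + part_hours*per_hour
--     ret_tup = (total_cost, one_none)
--     return ret_tup
-- ===== SOURCE B (Python) =====
-- def bill(per_hour, parts_prices_hours):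
--     # Sum raw present values and count missing fields, then correct by
--     # distributivity: each missing-hours entry contributes exactly 1*per_hour.
--     vals = list(parts_prices_hours.values())
--     price_sum = sum(p for p, _ in vals if p is not None)
--     hours_sum = sum(h for _, h in vals if h is not None)
--     none_prices = sum(1 for p, _ in vals if p is None)
--     none_hours = sum(1 for _, h in vals if h is None)
--     total = price_sum + (hours_sum + none_hours) * per_hour
--     return (total, none_prices + none_hours > 0)
-- ===== Notes on version B (the rewrite author's own statement) =====
-- stated objective: alternative
-- what changed: Instead of A's fused loop that substitutes defaults (0,1) per entry and carries a running flag, B sums the raw present prices and hours and counts missing fields, then reconstructs the total arithmetically as price_sum + (hours_sum + none_hours)*per_hour and derives the flag from the counts.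
import Mathlib
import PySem

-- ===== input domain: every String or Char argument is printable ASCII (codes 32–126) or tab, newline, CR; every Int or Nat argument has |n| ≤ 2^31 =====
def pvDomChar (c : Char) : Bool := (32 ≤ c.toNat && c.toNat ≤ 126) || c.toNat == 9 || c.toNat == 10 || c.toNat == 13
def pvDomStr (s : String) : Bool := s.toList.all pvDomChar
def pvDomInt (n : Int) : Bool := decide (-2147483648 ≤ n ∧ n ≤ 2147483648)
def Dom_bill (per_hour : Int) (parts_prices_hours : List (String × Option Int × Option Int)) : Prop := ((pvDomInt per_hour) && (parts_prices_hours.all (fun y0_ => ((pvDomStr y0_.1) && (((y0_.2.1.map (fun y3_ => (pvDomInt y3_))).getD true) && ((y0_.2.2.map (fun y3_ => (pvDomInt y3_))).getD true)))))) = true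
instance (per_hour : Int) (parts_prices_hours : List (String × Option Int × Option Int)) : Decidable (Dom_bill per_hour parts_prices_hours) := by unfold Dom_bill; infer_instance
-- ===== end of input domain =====

-- B replaces A's fused defaults-substituting loop by raw sums of the present values plus
-- counts of the missing fields, recombined arithmetically (alternative decomposition).

-- ===== PORT A =====
-- A iterates the dict's keys and looks each one up ('tup = parts_prices_hours.get(key)');
-- since a Python dict's keys are unique, that lookup yields exactly the entry's value, so
-- the loop is ported as a fold over the (key, value) entries in insertion order (exact).
def bill (per_hour : Int) (parts_prices_hours : List (String × Option Int × Option Int)) : Int × Bool :=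
  let st := parts_prices_hours.foldl
    (fun (st : Int × Bool) kv =>
      let tup := kv.2
      let part_price := tup.1
      let part_hours := tup.2
      let (part_price, one_none) :=
        match part_price with
        | none => ((0 : Int), true)
        | some p => (p, st.2)
      let (part_hours, one_none) :=
        match part_hours with
        | none => ((1 : Int), true)
        | some h => (h, one_none)
      (st.1 + (part_price + part_hours * per_hour), one_none))
    ((0 : Int), false)
  st

-- ===== PORT B =====
def bill_alt (per_hour : Int) (parts_prices_hours : List (String × Option Int × Option Int)) : Int × Bool :=
  let vals := parts_prices_hours.map (·.2)
  let price_sum := (vals.filterMap (·.1)).sum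
  let hours_sum := (vals.filterMap (·.2)).sum
  let none_prices := vals.countP (·.1.isNone)
  let none_hours := vals.countP (·.2.isNone)
  let total := price_sum + (hours_sum + (none_hours : Int)) * per_hour
  (total, decide (0 < none_prices + none_hours))

-- ===== PRECONDITION & SPEC =====
def Spec_bill (per_hour : Int) (parts_prices_hours : List (String × Option Int × Option Int)) (out : Int × Bool) : Prop := out = bill_alt per_hour parts_prices_hours
instance (per_hour : Int) (parts_prices_hours : List (String × Option Int × Option Int)) (out : Int × Bool) : Decidable (Spec_bill per_hour parts_prices_hours out) := by unfold Spec_bill; infer_instance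

-- ===== CLAIM (what is proved, stated in full; the proofs are below) =====
def Claim_equal_bill : Prop := ∀ (per_hour : Int) (parts_prices_hours : List (String × Option Int × Option Int)), Dom_bill per_hour parts_prices_hours → Spec_bill per_hour parts_prices_hours (bill per_hour parts_prices_hours)

-- ===== LEMMAS AND PROOFS =====

-- When the new entry has a missing field, both flags are true (any positive count wins).
theorem pv_flag_true (b : Bool) (n m : Nat) (h : 0 < m) :
    (true || decide (0 < n)) = (b || decide (0 < m)) := by
  simp [h]

-- A's fused loop from an arbitrary accumulator equals B's sums and counts combined with it.
theorem bill_loop_eq (per_hour : Int)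
    (l : List (String × Option Int × Option Int)) (t : Int) (b : Bool) :
    l.foldl
      (fun (st : Int × Bool) kv =>
        let tup := kv.2
        let part_price := tup.1
        let part_hours := tup.2
        let (part_price, one_none) :=
          match part_price with
          | none => ((0 : Int), true)
          | some p => (p, st.2)
        let (part_hours, one_none) :=
          match part_hours with
          | none => ((1 : Int), true)
          | some h => (h, one_none)
        (st.1 + (part_price + part_hours * per_hour), one_none))
      (t, b)
    = (t + (((l.map (·.2)).filterMap (·.1)).sum
          + ((((l.map (·.2)).filterMap (·.2)).sum
              + ((l.map (·.2)).countP (·.2.isNone) : Int)) * per_hour)),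
       b || decide (0 < (l.map (·.2)).countP (·.1.isNone)
                      + (l.map (·.2)).countP (·.2.isNone))) := by
  induction l generalizing t b with
  | nil => simp
  | cons hd tl ih =>
    obtain ⟨k, p, h⟩ := hd
    cases p <;> cases h <;>
        simp only [List.foldl_cons, List.map_cons, List.filterMap_cons, List.countP_cons, ih,
          Option.isNone_none, Option.isNone_some, List.sum_cons,
          Prod.mk.injEq] <;>
        refine ⟨by push_cast; ring, ?_⟩
    · exact pv_flag_true _ _ _ (by simp)
    · exact pv_flag_true _ _ _ (by simp)
    · exact pv_flag_true _ _ _ (by simp)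
    · rfl

-- ===== VERDICT (by name: the statement is the Claim_ definition above) =====
theorem bill_spec : Claim_equal_bill := by
  intro per_hour l _
  unfold Spec_bill bill bill_alt
  simp only [bill_loop_eq, zero_add, Bool.false_or]
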